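-- pv_equiv track=rewrite | github.com/or-m-or/KT-AIVLE-School-5th_Codingmasters | example/round2/Intermediate/Q8721_음식배달/A8721.py | solution
-- ===== SOURCE A (Python) =====
-- from itertools import combinations
-- from itertools import permutations
--
-- def solution(K, houses):
--     # (1, 1) is the restaurant's location
--     restaurant = (1, 1)
--
--     def manhattan_distance(p1, p2):
--         return abs(p2[0] - p1[0]) + abs(p2[1] - p1[1])
--
--     # Generate all combinations of houses where Cheolsu delivers exactly K houses
--     min_time = float('inf')
--
--     for house_combination in combinations(houses, K):
--         # We need to consider all permutations of visiting these houses because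
--         # the order in which houses are visited affects the total distance traveled.
--         # We use brute-force here since K <= 8, thus at most factorial(8) permutations,
--         # which is manageable.
--
--         # Iterate over all permutations of the K houses
--         for permutation in permutations(house_combination):
--             # Calculate the distance for this permutation
--             # Start at the restaurant, visit all houses in the permutation, and return to restaurant
--             total_distance = 0
--             current_location = restaurant
--
--             # Visit each house in the permutation
--             for house in permutation:
--                 total_distance += manhattan_distance(current_location, house)
--                 current_location = house
--
--             # Return to the restaurant
--             total_distance += manhattan_distance(current_location, restaurant)
--
--             # Update the minimum time if the current distance is less
--             min_time = min(min_time, total_distance)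
--
--     return min_time
-- ===== SOURCE B (Python) =====
-- def solution(K, houses):
--     # Recursive DFS over partial routes: extend the current route one house at a
--     # time and take the min over choices, so shared prefixes are costed once
--     # (A re-walks the whole path for every full permutation).
--     restaurant = (1, 1)
--
--     def dist(p, q):
--         return abs(q[0] - p[0]) + abs(q[1] - p[1])
--
--     def best(cur, rem, k):
--         if k == 0:
--             return dist(cur, restaurant)
--         return min(dist(cur, h) + best(h, rem[:i] + rem[i + 1:], k - 1)
--                    for i, h in enumerate(rem))
--
--     return best(restaurant, houses, K)
-- ===== Notes on version B (the rewrite author's own statement) =====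
-- stated objective: alternative
-- what changed: Replaces A's itertools enumeration of combinations x full permutations (re-walking every complete path) by a recursive depth-first search that extends the route one house at a time and takes running minima, so shared route prefixes are costed once.
-- outside the precondition, e.g. on solution(2, [(0, 0)]): A returns inf, B raises ValueError
import Mathlib
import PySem

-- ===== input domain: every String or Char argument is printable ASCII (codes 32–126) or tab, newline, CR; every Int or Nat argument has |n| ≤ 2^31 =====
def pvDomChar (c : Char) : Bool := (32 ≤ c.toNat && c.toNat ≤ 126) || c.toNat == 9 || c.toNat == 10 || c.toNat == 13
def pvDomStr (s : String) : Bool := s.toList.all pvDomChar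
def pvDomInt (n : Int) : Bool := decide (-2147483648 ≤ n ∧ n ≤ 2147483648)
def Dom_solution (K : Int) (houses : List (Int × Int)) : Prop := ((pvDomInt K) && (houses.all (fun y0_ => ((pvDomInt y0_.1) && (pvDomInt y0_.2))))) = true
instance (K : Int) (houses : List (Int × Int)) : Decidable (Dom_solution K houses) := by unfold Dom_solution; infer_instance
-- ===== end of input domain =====

-- B replaces A's combinations×permutations enumeration by a recursive DFS that extends
-- the route one house at a time (objective: alternative algorithm, same exact result).

-- ===== PORT A =====
-- manhattan_distance
def pvDist (p q : Int × Int) : Int := |q.1 - p.1| + |q.2 - p.2|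

-- A, literally: for each combination, for each permutation, walk the path accumulating
-- distance, close the tour, keep the running min.  float('inf') is modelled as `none`
-- (Pre_solution guarantees at least one tour, so the final value is `some` there);
-- combinations(houses, K) is PySem.List.combinations at K.toNat (K < 0, where Python
-- raises ValueError, is outside Pre_solution).
def solution (K : Int) (houses : List (Int × Int)) : Int :=
  let restaurant : Int × Int := (1, 1)
  let minTime : Option Int :=
    (PySem.List.combinations houses K.toNat).foldl (fun minTime comb =>
      (PySem.List.permutations comb comb.length).foldl (fun minTime perm =>
        let fin := perm.foldl
          (fun (st : Int × (Int × Int)) house => (st.1 + pvDist st.2 house, house))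
          (0, restaurant)
        let total := fin.1 + pvDist fin.2 restaurant
        match minTime with
        | none => some total
        | some m => some (min m total)) minTime) none
  minTime.getD 0

-- ===== PORT B =====
-- pvPicks rem = [(rem[i], rem[:i] + rem[i+1:]) for i in range(len(rem))]
def pvPicks : List (Int × Int) → List ((Int × Int) × List (Int × Int))
  | [] => []
  | x :: xs => (x, xs) :: (pvPicks xs).map (fun p => (p.1, x :: p.2))

-- cited by the `decreasing_by` of pvBest (and of the proof helper pvKperms below)
theorem pvPicks_snd_length {l : List (Int × Int)} {p : (Int × Int) × List (Int × Int)}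
    (h : p ∈ pvPicks l) : p.2.length < l.length := by
  induction l generalizing p with
  | nil => simp [pvPicks] at h
  | cons x xs ih =>
    simp only [pvPicks, List.mem_cons, List.mem_map] at h
    rcases h with h | ⟨q, hq, rfl⟩
    · subst h; simp
    · have := ih hq; simp; omega

-- B, literally: `best(cur, rem, k)` returning min over all ways to pick the next house;
-- `none` models the ValueError Python B raises when the min runs over an empty
-- generator (only outside Pre_solution).  The running `acc` is Python's `min(...)`.
def pvBest (cur : Int × Int) (rem : List (Int × Int)) (k : Int) : Option Int :=
  if k = 0 then some (pvDist cur (1, 1))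
  else (pvPicks rem).attach.foldl (fun acc p =>
    match pvBest p.1.1 p.1.2 (k - 1) with
    | none => acc
    | some v =>
      match acc with
      | none => some (pvDist cur p.1.1 + v)
      | some a => some (min a (pvDist cur p.1.1 + v))) none
termination_by rem.length
decreasing_by exact pvPicks_snd_length p.2

def solution_alt (K : Int) (houses : List (Int × Int)) : Int :=
  (pvBest (1, 1) houses K).getD 0

-- ===== PRECONDITION & SPEC =====
-- Pre_: 0 ≤ K (combinations(_, K<0) raises ValueError in A) and K ≤ len(houses)
-- (otherwise A returns float('inf'), not an int, and B raises ValueError).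
def Pre_solution (K : Int) (houses : List (Int × Int)) : Prop :=
  0 ≤ K ∧ K ≤ houses.length
instance (K : Int) (houses : List (Int × Int)) : Decidable (Pre_solution K houses) := by
  unfold Pre_solution; infer_instance

def pvWitness_solution : Int × (List (Int × Int)) := (1, [(2, 3)])

def Spec_solution (K : Int) (houses : List (Int × Int)) (out : Int) : Prop := out = solution_alt K houses
instance (K : Int) (houses : List (Int × Int)) (out : Int) : Decidable (Spec_solution K houses out) := by unfold Spec_solution; infer_instance

-- ===== CLAIM (what is proved, stated in full; the proofs are below) =====
def Claim_equal_solution : Prop := ∀ (K : Int) (houses : List (Int × Int)), Dom_solution K houses → Pre_solution K houses → Spec_solution K houses (solution K houses)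

-- ===== LEMMAS AND PROOFS =====

-- cost of the closed tour restaurant → route → restaurant
def pvCost : (Int × Int) → List (Int × Int) → Int
  | c, [] => pvDist c (1, 1)
  | c, h :: t => pvDist c h + pvCost h t

-- one running-min step (A's `min_time = min(min_time, total)` with min_time = inf as none)
def pvOmin (a : Option Int) (x : Int) : Option Int :=
  match a with
  | none => some x
  | some m => some (min m x)

-- all routes of length k drawn (by position) from l — the tree B's DFS walks
def pvKperms (k : Int) (l : List (Int × Int)) : List (List (Int × Int)) :=
  if k = 0 then [[]]
  else (pvPicks l).attach.flatMap (fun p => (pvKperms (k - 1) p.1.2).map (p.1.1 :: ·))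
termination_by l.length
decreasing_by exact pvPicks_snd_length p.2

-- the list A enumerates
def pvEA (K : Int) (houses : List (Int × Int)) : List (List (Int × Int)) :=
  (PySem.List.combinations houses K.toNat).flatMap (fun c => PySem.List.permutations c c.length)

theorem pvKperms_eq (k : Int) (l : List (Int × Int)) :
    pvKperms k l = if k = 0 then [[]]
      else (pvPicks l).flatMap (fun p => (pvKperms (k - 1) p.2).map (p.1 :: ·)) := by
  rw [pvKperms]
  by_cases hk : k = 0
  · simp [hk]
  · simp only [hk, if_false]
    rw [List.flatMap_subtype (g := fun p => (pvKperms (k - 1) p.2).map (p.1 :: ·)) (fun x h => rfl)]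
    rw [List.unattach_attach]

theorem pvBest_eq (cur : Int × Int) (rem : List (Int × Int)) (k : Int) :
    pvBest cur rem k = if k = 0 then some (pvDist cur (1, 1))
      else (pvPicks rem).foldl (fun acc p =>
        match pvBest p.1 p.2 (k - 1) with
        | none => acc
        | some v =>
          match acc with
          | none => some (pvDist cur p.1 + v)
          | some a => some (min a (pvDist cur p.1 + v))) none := by
  rw [pvBest]
  congr 1
  exact List.foldl_attach (f := fun (acc : Option Int) (p : (Int × Int) × List (Int × Int)) =>
    match pvBest p.1 p.2 (k - 1) with
    | none => acc
    | some v =>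
      match acc with
      | none => some (pvDist cur p.1 + v)
      | some a => some (min a (pvDist cur p.1 + v)))

-- ---- running-min fold algebra ----

theorem foldl_min_pull (t : List Int) (a x : Int) :
    t.foldl min (min a x) = min a (t.foldl min x) := by
  induction t generalizing x with
  | nil => rfl
  | cons y t ih => simpa [min_assoc] using ih (min x y)

theorem foldl_omin_some (l : List Int) (a : Int) :
    l.foldl pvOmin (some a) = some (l.foldl min a) := by
  induction l generalizing a with
  | nil => rfl
  | cons x t ih => simp [pvOmin, ih]

theorem foldl_omin_acc (l : List Int) (acc : Option Int) :
    l.foldl pvOmin acc = match l.foldl pvOmin none with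
      | none => acc
      | some v => pvOmin acc v := by
  cases l with
  | nil => cases acc <;> rfl
  | cons x t =>
    cases acc with
    | none => simp [pvOmin, foldl_omin_some]
    | some a =>
      simp only [List.foldl_cons, pvOmin, foldl_omin_some]
      simp [foldl_min_pull]

theorem foldl_omin_shift (l : List Int) (a : Int) :
    ((l.map (fun x => a + x)).foldl pvOmin none) = (l.foldl pvOmin none).map (fun x => a + x) := by
  cases l with
  | nil => rfl
  | cons x t =>
    simp only [List.map_cons, List.foldl_cons, pvOmin, foldl_omin_some]
    have : ∀ (t : List Int) (x : Int), (t.map (fun y => a + y)).foldl min (a + x) = a + t.foldl min x := by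
      intro t
      induction t with
      | nil => intro x; rfl
      | cons y t ih =>
        intro x
        simp only [List.map_cons, List.foldl_cons]
        rw [min_add_add_left, ih]
    simp [this]

theorem foldl_omin_eq_min? (l : List Int) : l.foldl pvOmin none = l.min? := by
  cases l with
  | nil => rfl
  | cons x t => simp [pvOmin, foldl_omin_some, List.min?]

theorem foldl_omin_eq_of_mem_iff {xs ys : List Int} (h : ∀ y, y ∈ xs ↔ y ∈ ys) :
    xs.foldl pvOmin none = ys.foldl pvOmin none := by
  rw [foldl_omin_eq_min?, foldl_omin_eq_min?]
  cases hx : xs.min? with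
  | none =>
    rw [List.min?_eq_none_iff] at hx
    subst hx
    cases hy : ys.min? with
    | none => rfl
    | some m =>
      have hm := (List.min?_eq_some_iff).1 hy
      exact absurd ((h m).2 hm.1) (by simp)
  | some m =>
    have hm := (List.min?_eq_some_iff).1 hx
    exact ((List.min?_eq_some_iff).2 ⟨(h m).1 hm.1, fun b hb => hm.2 b ((h b).2 hb)⟩).symm

-- ---- characterisation of A's value ----

theorem pathfold (l : List (Int × Int)) (a : Int) (c : Int × Int) :
    (l.foldl (fun (st : Int × (Int × Int)) h => (st.1 + pvDist st.2 h, h)) (a, c)).1 +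
      pvDist (l.foldl (fun (st : Int × (Int × Int)) h => (st.1 + pvDist st.2 h, h)) (a, c)).2 (1, 1)
      = a + pvCost c l := by
  induction l generalizing a c with
  | nil => rfl
  | cons h t ih => simp only [List.foldl_cons, pvCost, ih, add_assoc]

theorem solution_char (K : Int) (houses : List (Int × Int)) :
    solution K houses = (((pvEA K houses).map (pvCost (1, 1))).foldl pvOmin none).getD 0 := by
  unfold solution pvEA
  rw [List.map_flatMap, List.foldl_flatMap]
  dsimp only
  congr 1
  apply PySem.List.foldl_congr_mem
  intro mt comb _
  rw [List.foldl_map]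
  apply PySem.List.foldl_congr_mem
  intro acc perm _
  have h := pathfold perm 0 (1, 1)
  rw [zero_add] at h
  cases acc <;> simp [pvOmin, h]

-- ---- characterisation of B's value ----

theorem pvBest_char (n : Nat) : ∀ (rem : List (Int × Int)), rem.length ≤ n →
    ∀ (cur : Int × Int) (k : Int),
    pvBest cur rem k = ((pvKperms k rem).map (pvCost cur)).foldl pvOmin none := by
  induction n with
  | zero =>
    intro rem hrem cur k
    have : rem = [] := List.length_eq_zero_iff.1 (Nat.le_zero.1 hrem)
    subst this
    rw [pvBest_eq, pvKperms_eq]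
    by_cases hk : k = 0 <;> simp [hk, pvPicks, pvOmin, pvCost]
  | succ n ih =>
    intro rem hrem cur k
    rw [pvBest_eq, pvKperms_eq]
    by_cases hk : k = 0
    · simp [hk, pvOmin, pvCost]
    · simp only [hk, if_false]
      rw [List.map_flatMap, List.foldl_flatMap]
      apply PySem.List.foldl_congr_mem
      intro acc p hp
      have hlen : p.2.length ≤ n := by
        have := pvPicks_snd_length hp
        omega
      rw [List.map_map]
      have hmap : (pvCost cur ∘ (p.1 :: ·)) = fun t => pvDist cur p.1 + pvCost p.1 t := by
        funext t; rfl
      rw [hmap]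
      have hshift : ((pvKperms (k - 1) p.2).map (fun t => pvDist cur p.1 + pvCost p.1 t)).foldl pvOmin none
          = (((pvKperms (k - 1) p.2).map (pvCost p.1)).foldl pvOmin none).map
              (fun x => pvDist cur p.1 + x) := by
        have := foldl_omin_shift ((pvKperms (k - 1) p.2).map (pvCost p.1)) (pvDist cur p.1)
        simpa [List.map_map, Function.comp] using this
      rw [foldl_omin_acc, hshift, ← ih p.2 hlen p.1 (k - 1)]
      cases pvBest p.1 p.2 (k - 1) <;> cases acc <;> simp [pvOmin]

-- ---- membership characterisations ----

theorem mem_pvPicks_iff {l : List (Int × Int)} {p : (Int × Int) × List (Int × Int)} :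
    p ∈ pvPicks l ↔ ∃ l₁ l₂, l = l₁ ++ p.1 :: l₂ ∧ p.2 = l₁ ++ l₂ := by
  induction l generalizing p with
  | nil => simp [pvPicks]
  | cons x xs ih =>
    constructor
    · intro h
      simp only [pvPicks, List.mem_cons, List.mem_map] at h
      rcases h with h | ⟨q, hq, hqe⟩
      · exact ⟨[], xs, by simp [h], by simp [h]⟩
      · obtain ⟨l₁, l₂, h1, h2⟩ := ih.1 hq
        refine ⟨x :: l₁, l₂, ?_, ?_⟩ <;> simp [← hqe, h1, h2]
    · rintro ⟨l₁, l₂, h1, h2⟩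
      cases l₁ with
      | nil =>
        simp only [List.nil_append] at h1 h2
        have hx : p.1 = x ∧ p.2 = xs := by
          refine ⟨?_, ?_⟩ <;> simp_all
        simp only [pvPicks, List.mem_cons]
        left
        exact Prod.ext hx.1 hx.2
      | cons z l₁ =>
        simp only [List.cons_append, List.cons_eq_cons] at h1
        obtain ⟨rfl, hxs⟩ := h1
        simp only [pvPicks, List.mem_cons, List.mem_map]
        right
        refine ⟨(p.1, l₁ ++ l₂), ih.2 ⟨l₁, l₂, hxs, rfl⟩, ?_⟩
        have : p.2 = x :: (l₁ ++ l₂) := by simp [h2]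
        exact Prod.ext rfl this.symm

theorem eraseIdx_middle (s u : List (Int × Int)) (a : Int × Int) :
    (s ++ a :: u).eraseIdx s.length = s ++ u := by
  induction s with
  | nil => rfl
  | cons x xs ih => simp [ih]

theorem getElem?_middle (s u : List (Int × Int)) (a : Int × Int) :
    (s ++ a :: u)[s.length]? = some a := by
  rw [List.getElem?_append_right (le_refl _)]
  simp

theorem mem_permutations_of_perm : ∀ (y c : List (Int × Int)), y.Perm c →
    y ∈ PySem.List.permutations c c.length := by
  intro y
  induction y with
  | nil =>
    intro c hc
    obtain rfl := hc.nil_eq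
    simp [PySem.List.permutations_zero]
  | cons h t ih =>
    intro c hc
    have hmem : h ∈ c := hc.mem_iff.1 (by simp)
    obtain ⟨s, u, rfl⟩ := List.append_of_mem hmem
    have hlen : (s ++ h :: u).length = (s ++ u).length + 1 := by simp; omega
    rw [hlen, PySem.List.permutations_succ]
    rw [List.mem_flatMap]
    refine ⟨s.length, ?_, ?_⟩
    · rw [List.mem_range]
      simp
    · rw [getElem?_middle]
      simp only [List.mem_map]
      refine ⟨t, ?_, rfl⟩
      rw [eraseIdx_middle]
      have hperm : t.Perm (s ++ u) := (hc.trans List.perm_middle).cons_inv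
      exact ih (s ++ u) hperm

theorem mem_permutations_iff_perm (c y : List (Int × Int)) :
    y ∈ PySem.List.permutations c c.length ↔ y.Perm c :=
  ⟨PySem.List.perm_of_mem_permutations, mem_permutations_of_perm y c⟩

theorem mem_pvEA_iff (K : Int) (houses : List (Int × Int)) (x : List (Int × Int)) :
    x ∈ pvEA K houses ↔ x.Subperm houses ∧ x.length = K.toNat := by
  unfold pvEA
  rw [List.mem_flatMap]
  constructor
  · rintro ⟨c, hc, hx⟩
    obtain ⟨hsub, hlen⟩ := (PySem.List.mem_combinations_iff _ _ _).1 hc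
    have hperm := (mem_permutations_iff_perm c x).1 hx
    exact ⟨⟨c, hperm.symm, hsub⟩, by rw [hperm.length_eq, hlen]⟩
  · rintro ⟨⟨c, hcp, hsub⟩, hlen⟩
    refine ⟨c, (PySem.List.mem_combinations_iff _ _ _).2 ⟨hsub, by rw [hcp.length_eq, hlen]⟩, ?_⟩
    exact (mem_permutations_iff_perm c x).2 hcp.symm

theorem mem_pvKperms_iff (n : Nat) : ∀ (l : List (Int × Int)), l.length ≤ n →
    ∀ (k : Int) (x : List (Int × Int)),
    x ∈ pvKperms k l ↔ x.Subperm l ∧ (x.length : Int) = k := by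
  induction n with
  | zero =>
    intro l hl k x
    have : l = [] := List.length_eq_zero_iff.1 (Nat.le_zero.1 hl)
    subst this
    by_cases hk : k = 0
    · subst hk
      rw [pvKperms_eq, if_pos rfl]
      simp only [List.mem_singleton]
      constructor
      · rintro rfl; exact ⟨List.nil_subperm, rfl⟩
      · rintro ⟨hsub, hlen⟩
        exact List.subperm_nil.1 hsub
    · rw [pvKperms_eq, if_neg hk]
      simp only [pvPicks, List.flatMap_nil, List.not_mem_nil, false_iff, not_and]
      intro hsub
      obtain rfl := List.subperm_nil.1 hsub
      simpa using hk ∘ Eq.symm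
  | succ n ih =>
    intro l hl k x
    by_cases hk : k = 0
    · subst hk
      rw [pvKperms_eq, if_pos rfl]
      simp only [List.mem_singleton]
      constructor
      · rintro rfl; exact ⟨List.nil_subperm, rfl⟩
      · rintro ⟨hsub, hlen⟩
        have : x.length = 0 := by exact_mod_cast hlen
        exact List.length_eq_zero_iff.1 this
    · rw [pvKperms_eq, if_neg hk]
      simp only [List.mem_flatMap, List.mem_map]
      constructor
      · rintro ⟨p, hp, t, ht, rfl⟩
        have hlen : p.2.length ≤ n := by have := pvPicks_snd_length hp; omega
        obtain ⟨hsub, htlen⟩ := (ih p.2 hlen (k - 1) t).1 ht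
        obtain ⟨l₁, l₂, rfl, hp2⟩ := mem_pvPicks_iff.1 hp
        rw [hp2] at hsub
        refine ⟨((List.subperm_cons p.1).2 hsub).trans List.perm_middle.symm.subperm, ?_⟩
        simp
        omega
      · rintro ⟨hsub, hlen⟩
        cases x with
        | nil => simp at hlen; omega
        | cons h t =>
          have hmem : h ∈ l := hsub.subset (by simp)
          obtain ⟨s, u, rfl⟩ := List.append_of_mem hmem
          have hsub' : (h :: t).Subperm (h :: (s ++ u)) :=
            hsub.trans List.perm_middle.subperm
          have htsub : t.Subperm (s ++ u) := (List.subperm_cons h).1 hsub'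
          have hlen' : (s ++ u).length ≤ n := by
            have : (s ++ h :: u).length ≤ n + 1 := hl
            simp at this ⊢
            omega
          refine ⟨(h, s ++ u), mem_pvPicks_iff.2 ⟨s, u, rfl, rfl⟩, t, ?_, rfl⟩
          refine (ih (s ++ u) hlen' (k - 1) t).2 ⟨htsub, ?_⟩
          simp at hlen
          omega

-- ===== VERDICT (by name: the statement is the Claim_ definition above) =====
theorem solution_spec : Claim_equal_solution := by
  intro K houses _ hpre
  unfold Spec_solution solution_alt
  obtain ⟨hK, _⟩ := hpre
  rw [solution_char, pvBest_char houses.length houses (le_refl _)]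
  congr 1
  apply foldl_omin_eq_of_mem_iff
  intro y
  simp only [List.mem_map]
  constructor
  · rintro ⟨p, hp, rfl⟩
    obtain ⟨hsub, hlen⟩ := (mem_pvEA_iff K houses p).1 hp
    refine ⟨p, (mem_pvKperms_iff houses.length houses (le_refl _) K p).2 ⟨hsub, ?_⟩, rfl⟩
    rw [hlen]
    exact Int.toNat_of_nonneg hK
  · rintro ⟨p, hp, rfl⟩
    obtain ⟨hsub, hlen⟩ := (mem_pvKperms_iff houses.length houses (le_refl _) K p).1 hp
    refine ⟨p, (mem_pvEA_iff K houses p).2 ⟨hsub, ?_⟩, rfl⟩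
    omega
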